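-- pv_equiv track=rewrite | github.com/mschuylermoss/HeisenbergRNN | Triangular/interactions.py | generate_sublattices_triangular
-- ===== SOURCE A (Python) =====
-- def coord_to_site_bravais(L, x, y, snake=False):
--     if snake and (y % 2 == 1):
--         return L * y + L - x - 1
--     else:
--         return L * y + x
--
-- def generate_sublattices_triangular(Lx, Ly, snake=False):
--     A_sites = []
--     B_sites = []
--     C_sites = []
--     all_assignments = []
--     coord_fn = lambda x, y: coord_to_site_bravais(Lx, x, y, snake)
--
--     for nx in range(Lx):
--         for ny in range(Ly):
--             if nx % 3 == 0:
--                 if ny % 3 == 0: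
--                     sublattice = 0
--                     A_sites.append(coord_fn(nx, ny))
--                 elif ny % 3 == 1:
--                     sublattice = 1
--                     C_sites.append(coord_fn(nx, ny))
--                 else:
--                     sublattice = 2
--                     B_sites.append(coord_fn(nx, ny))
--             elif nx % 3 == 1:
--                 if ny % 3 == 0:
--                     sublattice = 1
--                     B_sites.append(coord_fn(nx, ny))
--                 elif ny % 3 == 1:
--                     sublattice = 2
--                     A_sites.append(coord_fn(nx, ny))
--                 else:
--                     sublattice = 0
--                     C_sites.append(coord_fn(nx, ny))
--             else:
--                 if ny % 3 == 0:
--                     sublattice = 2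
--                     C_sites.append(coord_fn(nx, ny))
--                 elif ny % 3 == 1:
--                     sublattice = 0
--                     B_sites.append(coord_fn(nx, ny))
--                 else:
--                     sublattice = 1
--                     A_sites.append(coord_fn(nx, ny))
--             all_assignments.append(sublattice)
--
--     return A_sites, B_sites, C_sites, all_assignments
-- ===== SOURCE B (Python) =====
-- def coord_to_site_bravais(L, x, y, snake=False):
--     if snake and (y % 2 == 1):
--         return L * y + L - x - 1
--     else:
--         return L * y + x
--
-- def generate_sublattices_triangular(Lx, Ly, snake=False):
--     # Build the coordinate sequence once, then derive each output list in its
--     # own independent filter/map pass instead of one stateful loop with a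
--     # nine-way branch.
--     coords = [(nx, ny) for nx in range(Lx) for ny in range(Ly)]
--     def pick(r):
--         return [coord_to_site_bravais(Lx, x, y, snake)
--                 for (x, y) in coords if (x - y) % 3 == r]
--     return pick(0), pick(1), pick(2), [(x + y) % 3 for (x, y) in coords]
-- ===== Notes on version B (the rewrite author's own statement) =====
-- stated objective: simpler
-- what changed: Instead of one stateful nested loop dispatching through a nine-way (nx%3, ny%3) branch table into shared accumulators, B materialises the coordinate sequence once and derives each of the four output lists in its own independent filter/map pass (membership of sublattice r is (x-y)%3==r, the label is (x+y)%3).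
import Mathlib
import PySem

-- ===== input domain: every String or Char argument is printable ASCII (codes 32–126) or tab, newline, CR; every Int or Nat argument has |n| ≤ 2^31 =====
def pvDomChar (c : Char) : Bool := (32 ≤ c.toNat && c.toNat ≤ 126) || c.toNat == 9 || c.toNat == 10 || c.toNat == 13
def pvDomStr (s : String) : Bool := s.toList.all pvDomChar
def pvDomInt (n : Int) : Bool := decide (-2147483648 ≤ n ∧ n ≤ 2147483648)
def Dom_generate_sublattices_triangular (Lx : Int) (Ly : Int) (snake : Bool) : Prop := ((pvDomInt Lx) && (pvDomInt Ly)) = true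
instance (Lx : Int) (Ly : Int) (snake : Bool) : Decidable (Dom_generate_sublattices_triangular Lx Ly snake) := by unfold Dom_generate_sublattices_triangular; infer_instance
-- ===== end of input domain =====

-- B builds the coordinate list once and derives each output list in its own
-- independent filter/map pass instead of A's single stateful loop with a
-- nine-way branch (objective: simpler).

-- ===== PORT A =====
def coord_to_site_bravais (L : Int) (x : Int) (y : Int) (snake : Bool) : Int :=
  if snake && (PySem.Int.mod y 2 == 1) then L * y + L - x - 1 else L * y + x

-- body of A's inner loop: the nine-case nested conditional
def pvStepA (Lx : Int) (snake : Bool) (nx : Int)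
    (st : List Int × List Int × List Int × List Int) (ny : Int) :
    List Int × List Int × List Int × List Int :=
  match st with
  | (As, Bs, Cs, alls) =>
    if PySem.Int.mod nx 3 == 0 then
      if PySem.Int.mod ny 3 == 0 then (As ++ [coord_to_site_bravais Lx nx ny snake], Bs, Cs, alls ++ [0])
      else if PySem.Int.mod ny 3 == 1 then (As, Bs, Cs ++ [coord_to_site_bravais Lx nx ny snake], alls ++ [1])
      else (As, Bs ++ [coord_to_site_bravais Lx nx ny snake], Cs, alls ++ [2])
    else if PySem.Int.mod nx 3 == 1 then
      if PySem.Int.mod ny 3 == 0 then (As, Bs ++ [coord_to_site_bravais Lx nx ny snake], Cs, alls ++ [1])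
      else if PySem.Int.mod ny 3 == 1 then (As ++ [coord_to_site_bravais Lx nx ny snake], Bs, Cs, alls ++ [2])
      else (As, Bs, Cs ++ [coord_to_site_bravais Lx nx ny snake], alls ++ [0])
    else
      if PySem.Int.mod ny 3 == 0 then (As, Bs, Cs ++ [coord_to_site_bravais Lx nx ny snake], alls ++ [2])
      else if PySem.Int.mod ny 3 == 1 then (As, Bs ++ [coord_to_site_bravais Lx nx ny snake], Cs, alls ++ [0])
      else (As ++ [coord_to_site_bravais Lx nx ny snake], Bs, Cs, alls ++ [1])

def generate_sublattices_triangular (Lx : Int) (Ly : Int) (snake : Bool) : List Int × List Int × List Int × List Int :=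
  (PySem.List.pyRange 0 Lx 1).foldl
    (fun st nx => (PySem.List.pyRange 0 Ly 1).foldl (pvStepA Lx snake nx) st)
    ([], [], [], [])

-- ===== PORT B =====
def coord_to_site_bravais_alt (L : Int) (x : Int) (y : Int) (snake : Bool) : Int :=
  if snake && (PySem.Int.mod y 2 == 1) then L * y + L - x - 1 else L * y + x

-- coords = [(nx, ny) for nx in range(Lx) for ny in range(Ly)]
def pvCoords (Lx : Int) (Ly : Int) : List (Int × Int) :=
  (PySem.List.pyRange 0 Lx 1).flatMap
    (fun nx => (PySem.List.pyRange 0 Ly 1).map (fun ny => (nx, ny)))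

-- pick(r): one filter/map pass over coords
def pvPick (Lx : Int) (snake : Bool) (coords : List (Int × Int)) (r : Int) : List Int :=
  (coords.filter (fun p => PySem.Int.mod (p.1 - p.2) 3 == r)).map
    (fun p => coord_to_site_bravais_alt Lx p.1 p.2 snake)

def generate_sublattices_triangular_alt (Lx : Int) (Ly : Int) (snake : Bool) : List Int × List Int × List Int × List Int :=
  let coords := pvCoords Lx Ly
  (pvPick Lx snake coords 0, pvPick Lx snake coords 1, pvPick Lx snake coords 2,
   coords.map (fun p => PySem.Int.mod (p.1 + p.2) 3))

-- ===== PRECONDITION & SPEC =====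
def Spec_generate_sublattices_triangular (Lx : Int) (Ly : Int) (snake : Bool) (out : List Int × List Int × List Int × List Int) : Prop := out = generate_sublattices_triangular_alt Lx Ly snake
instance (Lx : Int) (Ly : Int) (snake : Bool) (out : List Int × List Int × List Int × List Int) : Decidable (Spec_generate_sublattices_triangular Lx Ly snake out) := by unfold Spec_generate_sublattices_triangular; infer_instance

-- ===== CLAIM =====
def Claim_equal_generate_sublattices_triangular : Prop := ∀ (Lx : Int) (Ly : Int) (snake : Bool), Dom_generate_sublattices_triangular Lx Ly snake → Spec_generate_sublattices_triangular Lx Ly snake (generate_sublattices_triangular Lx Ly snake)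

-- ===== LEMMAS AND PROOFS =====

-- A's step, characterised via (nx-ny)%3 / (nx+ny)%3
theorem pvStepA_char (Lx : Int) (snake : Bool) (nx : Int)
    (As Bs Cs alls : List Int) (ny : Int) :
    pvStepA Lx snake nx (As, Bs, Cs, alls) ny =
      (As ++ (if PySem.Int.mod (nx - ny) 3 == 0 then [coord_to_site_bravais Lx nx ny snake] else []),
       Bs ++ (if PySem.Int.mod (nx - ny) 3 == 1 then [coord_to_site_bravais Lx nx ny snake] else []),
       Cs ++ (if PySem.Int.mod (nx - ny) 3 == 2 then [coord_to_site_bravais Lx nx ny snake] else []),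
       alls ++ [PySem.Int.mod (nx + ny) 3]) := by
  have hm : ∀ a : Int, PySem.Int.mod a 3 = a % 3 :=
    fun a => PySem.Int.mod_eq_emod_of_pos (by norm_num)
  simp only [pvStepA, hm, beq_iff_eq]
  split_ifs <;>
    first
      | (exfalso; omega)
      | (simp only [Prod.mk.injEq, List.append_nil, List.append_right_inj,
          List.cons.injEq, and_true, true_and]; omega)

-- folding A's step over any list of pairs appends the four filter/map passes
theorem foldl_pvStepA_pairs (Lx : Int) (snake : Bool) (ps : List (Int × Int))
    (As Bs Cs alls : List Int) :
    ps.foldl (fun st p => pvStepA Lx snake p.1 st p.2) (As, Bs, Cs, alls) =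
      (As ++ pvPick Lx snake ps 0, Bs ++ pvPick Lx snake ps 1, Cs ++ pvPick Lx snake ps 2,
       alls ++ ps.map (fun p => PySem.Int.mod (p.1 + p.2) 3)) := by
  induction ps generalizing As Bs Cs alls with
  | nil => simp [pvPick]
  | cons p ps ih =>
    obtain ⟨nx, ny⟩ := p
    simp only [List.foldl_cons, pvStepA_char, ih]
    simp only [pvPick, List.filter_cons, List.map_cons, coord_to_site_bravais_alt,
      coord_to_site_bravais]
    split_ifs with h0 h1 h2 <;>
      simp_all [List.append_assoc]

-- A's nested foldl is the foldl over the flattened coordinate list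
theorem foldl_nested_eq_pairs (Lx : Int) (Ly : Int) (snake : Bool)
    (st : List Int × List Int × List Int × List Int) :
    (PySem.List.pyRange 0 Lx 1).foldl
      (fun st nx => (PySem.List.pyRange 0 Ly 1).foldl (pvStepA Lx snake nx) st) st =
    (pvCoords Lx Ly).foldl (fun st p => pvStepA Lx snake p.1 st p.2) st := by
  unfold pvCoords
  induction PySem.List.pyRange 0 Lx 1 generalizing st with
  | nil => rfl
  | cons nx rest ih =>
    simp only [List.foldl_cons, List.flatMap_cons, List.foldl_append, List.foldl_map, ih]

-- ===== VERDICT =====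
theorem generate_sublattices_triangular_spec : Claim_equal_generate_sublattices_triangular := by
  intro Lx Ly snake _
  unfold Spec_generate_sublattices_triangular generate_sublattices_triangular
    generate_sublattices_triangular_alt
  rw [foldl_nested_eq_pairs, foldl_pvStepA_pairs]
  simp
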